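-- pv_equiv track=rewrite | github.com/google/distla_core | distla/distla_core/distla_core/blas/cannons/simple_cannons.py | _make_shuffle_pcols
-- ===== SOURCE A (Python) =====
-- import collections
--
-- def _make_shuffle_pcols(n, grid):
--   """
--   Generates a list of integers instructing `pshuffle` to have each processor
--   n units downward.
--
--   Returns e.g.
--     (4, 5, 6, 7, 0, 1, 2, 3)
--   For n=1, grid=(2, 2, 2), "shift hor"
--   """
--   Ncore, Nrow, Ncol = grid
--   chips_per_pcol = Ncore * Nrow
--   out = collections.deque()
--   for i in range(Ncol):
--     col = tuple(list(range(i * chips_per_pcol, (i + 1) * chips_per_pcol)))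
--     out.append(col)
--   out.rotate(n)
--   out = list(out)
--   to_return = []
--   for tup in out:
--     to_return += list(tup)
--   return tuple(to_return)
-- ===== SOURCE B (Python) =====
-- def _make_shuffle_pcols(n, grid):
--   Ncore, Nrow, Ncol = grid
--   chips_per_pcol = Ncore * Nrow
--   out = []
--   for j in range(Ncol):
--     src = (j - n) % Ncol
--     out.extend(range(src * chips_per_pcol, (src + 1) * chips_per_pcol))
--   return tuple(out)
-- ===== Notes on version B (the rewrite author's own statement) =====
-- stated objective: simpler
-- what changed: Replaces the deque of per-column tuples plus rotate plus flattening pass with a single loop that computes each output block's source column by closed-form modular arithmetic ((j - n) % Ncol) and extends a flat list directly.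
import Mathlib
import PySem

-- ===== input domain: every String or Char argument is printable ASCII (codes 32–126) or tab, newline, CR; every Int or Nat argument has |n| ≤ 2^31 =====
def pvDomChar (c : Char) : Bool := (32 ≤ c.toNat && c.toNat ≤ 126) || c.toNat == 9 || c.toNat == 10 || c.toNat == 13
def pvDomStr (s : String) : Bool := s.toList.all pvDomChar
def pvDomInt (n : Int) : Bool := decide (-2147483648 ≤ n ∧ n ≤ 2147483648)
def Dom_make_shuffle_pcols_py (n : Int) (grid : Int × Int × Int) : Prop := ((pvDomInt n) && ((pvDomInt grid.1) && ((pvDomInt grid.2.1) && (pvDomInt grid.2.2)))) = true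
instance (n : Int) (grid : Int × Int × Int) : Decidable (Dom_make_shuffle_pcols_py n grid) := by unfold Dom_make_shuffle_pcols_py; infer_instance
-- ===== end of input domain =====

-- B drops the deque of per-column tuples and the rotate: each output block's source column is
-- computed directly as (j - n) % Ncol in one flat pass (objective: simpler).


-- ===== PORT A =====
-- deque.rotate(n): exact on every List (List Int) — on an empty deque it is a no-op, otherwise
-- it rotates right by n mod len (Python reduces n modulo the length; a right rotation by k
-- moves the last k elements to the front).
def pyDequeRotate (xs : List (List Int)) (n : Int) : List (List Int) :=
  if xs.length = 0 then xs
  else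
    let k := (PySem.Int.mod n (xs.length : Int)).toNat
    xs.drop (xs.length - k) ++ xs.take (xs.length - k)

def make_shuffle_pcols_py (n : Int) (grid : Int × Int × Int) : List Int :=
  let Ncore := grid.1
  let Nrow := grid.2.1
  let Ncol := grid.2.2
  let chips_per_pcol := Ncore * Nrow
  let out := (PySem.List.pyRange 0 Ncol 1).foldl
    (fun acc i => acc ++ [PySem.List.pyRange (i * chips_per_pcol) ((i + 1) * chips_per_pcol) 1])
    ([] : List (List Int))
  let out2 := pyDequeRotate out n
  out2.foldl (fun acc tup => acc ++ tup) []

-- ===== PORT B =====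
def make_shuffle_pcols_py_alt (n : Int) (grid : Int × Int × Int) : List Int :=
  let chips_per_pcol := grid.1 * grid.2.1
  let Ncol := grid.2.2
  (PySem.List.pyRange 0 Ncol 1).foldl
    (fun acc j =>
      let src := PySem.Int.mod (j - n) Ncol
      acc ++ PySem.List.pyRange (src * chips_per_pcol) ((src + 1) * chips_per_pcol) 1)
    []

-- ===== PRECONDITION & SPEC =====
def Spec_make_shuffle_pcols_py (n : Int) (grid : Int × Int × Int) (out : List Int) : Prop := out = make_shuffle_pcols_py_alt n grid
instance (n : Int) (grid : Int × Int × Int) (out : List Int) : Decidable (Spec_make_shuffle_pcols_py n grid out) := by unfold Spec_make_shuffle_pcols_py; infer_instance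

-- ===== CLAIM (what is proved, stated in full; the proofs are below) =====
def Claim_equal_make_shuffle_pcols_py : Prop := ∀ (n : Int) (grid : Int × Int × Int), Dom_make_shuffle_pcols_py n grid → Spec_make_shuffle_pcols_py n grid (make_shuffle_pcols_py n grid)

-- ===== LEMMAS AND PROOFS =====

-- B's source-index list (j - n) % Ncol for j in range(Ncol) is exactly A's rotated index order.
theorem src_list_eq (n N : Int) (hN : 0 < N) :
    (PySem.List.pyRange 0 N 1).map (fun j => PySem.Int.mod (j - n) N) =
      (PySem.List.pyRange 0 N 1).drop (N.toNat - (PySem.Int.mod n N).toNat) ++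
      (PySem.List.pyRange 0 N 1).take (N.toNat - (PySem.Int.mod n N).toNat) := by
  have hr0 : 0 ≤ PySem.Int.mod n N := PySem.Int.mod_nonneg n hN
  have hrN : PySem.Int.mod n N < N := PySem.Int.mod_lt n hN
  set r := PySem.Int.mod n N with hr
  set k := r.toNat with hk
  have hkr : (k : Int) = r := by omega
  have hkN : k ≤ N.toNat := by omega
  have hlen : (PySem.List.pyRange 0 N 1).length = N.toNat := by
    simp [PySem.List.length_pyRange_one]
  have hmodcongr : ∀ j : Int, PySem.Int.mod (j - n) N = PySem.Int.mod (j - r) N := by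
    intro j
    rw [PySem.Int.mod_eq_emod_of_pos hN, PySem.Int.mod_eq_emod_of_pos hN]
    have hnr : Int.ModEq N n r := by
      show n % N = r % N
      rw [Int.emod_eq_of_lt hr0 hrN, hr, PySem.Int.mod_eq_emod_of_pos hN]
    exact (Int.ModEq.refl j).sub hnr
  apply List.ext_getElem
  · simp [hlen]
  · intro i h1 h2
    have hiN : i < N.toNat := by simpa [hlen] using h1
    have hdroplen : ((PySem.List.pyRange 0 N 1).drop (N.toNat - k)).length = k := by
      simp [hlen]; omega
    simp only [List.getElem_map]
    rw [hmodcongr, PySem.Int.mod_eq_emod_of_pos hN]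
    rw [PySem.List.getElem_pyRange_one]
    by_cases hik : i < k
    · rw [List.getElem_append_left (by omega)]
      rw [List.getElem_drop, PySem.List.getElem_pyRange_one]
      have hval : (0 : Int) + (i : Int) - r = ((0 : Int) + ((N.toNat - k + i : Nat) : Int)) - N := by
        push_cast; omega
      rw [hval]
      rw [Int.sub_emod_right]
      exact Int.emod_eq_of_lt (by push_cast; omega) (by push_cast; omega)
    · rw [List.getElem_append_right (by omega)]
      rw [List.getElem_take, PySem.List.getElem_pyRange_one]
      rw [Int.emod_eq_of_lt (by omega) (by omega)]
      omega

theorem make_shuffle_pcols_py_eq (n : Int) (grid : Int × Int × Int) :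
    make_shuffle_pcols_py n grid = make_shuffle_pcols_py_alt n grid := by
  obtain ⟨Ncore, Nrow, Ncol⟩ := grid
  unfold make_shuffle_pcols_py make_shuffle_pcols_py_alt
  simp only []
  set c := Ncore * Nrow with hc
  set L := PySem.List.pyRange 0 Ncol 1 with hL
  set block : Int → List Int := fun i => PySem.List.pyRange (i * c) ((i + 1) * c) 1 with hb
  rw [PySem.List.foldl_append_singleton_eq_map, PySem.List.foldl_append_eq_flatten,
      PySem.List.foldl_append_eq_flatMap]
  simp only [List.nil_append]
  by_cases hN : 0 < Ncol
  · have hlen : L.length = Ncol.toNat := by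
      simp [hL, PySem.List.length_pyRange_one]
    have hml : (L.map block).length = Ncol.toNat := by simp [hlen]
    have hne : (L.map block).length ≠ 0 := by omega
    rw [pyDequeRotate, if_neg hne, hml]
    have hflat : L.flatMap (fun j =>
        PySem.List.pyRange (PySem.Int.mod (j - n) Ncol * c) ((PySem.Int.mod (j - n) Ncol + 1) * c) 1)
        = (L.map (fun j => PySem.Int.mod (j - n) Ncol)).flatMap block := by
      rw [List.flatMap_map]
    rw [hflat, hL, src_list_eq n Ncol hN, ← hL]
    show ((L.map block).drop (Ncol.toNat - (PySem.Int.mod n (Ncol.toNat : Int)).toNat) ++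
        (L.map block).take (Ncol.toNat - (PySem.Int.mod n (Ncol.toNat : Int)).toNat)).flatten = _
    rw [Int.toNat_of_nonneg (le_of_lt hN)]
    rw [List.flatMap_def, List.map_append]
    simp [List.map_drop, List.map_take]
  · have : L = [] := by
      rw [hL]; exact PySem.List.pyRange_one_eq_nil (by omega)
    simp [this, pyDequeRotate]

-- ===== VERDICT (by name: the statement is the Claim_ definition above) =====
theorem make_shuffle_pcols_py_spec : Claim_equal_make_shuffle_pcols_py := by
  intro n grid _
  exact make_shuffle_pcols_py_eq n grid
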